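-- pv_equiv track=rewrite | github.com/Pathakvishnu/Leetcode_Daily_Problems | 841. Keys and Rooms/keys_and_rooms.py | canVisitAllRoomsBFS
-- ===== SOURCE A (Python) =====
-- from typing import List
--
-- def canVisitAllRoomsBFS(rooms: List[List[int]]) -> bool:
--     num_rooms = len(rooms)
--     visited = [False]*num_rooms
--
--     # bfs approach
--     queue = [0]
--     while queue:
--         temp = list()
--         for room_no in queue:
--             if not visited[room_no]:
--                 visited[room_no]=True
--                 for nxt_room_no in rooms[room_no]:
--                     temp.append(nxt_room_no)
--             queue = temp
--
--     return all(visited)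
-- ===== SOURCE B (Python) =====
-- from typing import List
--
-- def canVisitAllRoomsBFS(rooms: List[List[int]]) -> bool:
--     visited = [False] * len(rooms)
--     stack = [0]
--     while stack:
--         room = stack.pop()
--         if not visited[room]:
--             visited[room] = True
--             stack.extend(rooms[room])
--     return all(visited)
-- ===== Notes on version B (the rewrite author's own statement) =====
-- stated objective: alternative
-- what changed: Replaced A's level-batched BFS (an outer while-loop that rebuilds the whole frontier list `temp` each round with a nested for-loop) by a single-pop explicit-stack DFS that pops one room at a time, marks it if unvisited and pushes its keys.
-- outside the precondition, e.g. on canVisitAllRoomsBFS([]): A raises IndexError, B raises IndexError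
import Mathlib
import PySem

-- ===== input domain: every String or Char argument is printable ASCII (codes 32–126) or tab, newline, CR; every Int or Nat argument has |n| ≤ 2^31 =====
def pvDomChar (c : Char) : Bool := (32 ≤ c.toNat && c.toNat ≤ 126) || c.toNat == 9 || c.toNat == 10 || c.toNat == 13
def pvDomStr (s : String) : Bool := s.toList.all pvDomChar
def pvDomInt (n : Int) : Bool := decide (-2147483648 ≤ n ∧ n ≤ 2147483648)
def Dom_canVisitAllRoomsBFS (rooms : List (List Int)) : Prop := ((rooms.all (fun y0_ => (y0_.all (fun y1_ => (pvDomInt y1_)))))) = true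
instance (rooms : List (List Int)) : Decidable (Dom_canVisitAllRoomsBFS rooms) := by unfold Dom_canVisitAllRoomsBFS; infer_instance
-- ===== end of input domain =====

-- B replaces A's level-batched BFS (rebuilding the whole frontier list each round) with a
-- single-pop explicit-stack DFS; same cost class, genuinely different traversal (objective: alternative).

-- ===== PORT A =====
-- One step of A's inner `for room_no in queue` loop: skip visited rooms, otherwise mark and
-- append the room's keys to `temp` (the `none` branch is Python's IndexError, excluded by Pre_).
def bfsStep (rooms : List (List Int)) (st : List Bool × List Int) (r : Int) :
    List Bool × List Int :=
  match PySem.List.pyGet? st.1 r with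
  | none => st
  | some b =>
    if b then st
    else (PySem.List.pySetD st.1 r true, st.2 ++ (PySem.List.pyGet? rooms r).getD [])

-- termination helper for the two loops (cited by their decreasing_by)
theorem count_false_bfsStep (rooms : List (List Int)) (st : List Bool × List Int) (r : Int) :
    (bfsStep rooms st r).1.count false < st.1.count false ∨ bfsStep rooms st r = st := by
  unfold bfsStep
  cases h : PySem.List.pyGet? st.1 r with
  | none => right; rfl
  | some b =>
    cases b with
    | true => right; simp
    | false =>
      left
      simp only [Bool.false_eq_true, if_false]
      obtain ⟨k, hk, hkv⟩ : ∃ k, PySem.List.pyIdx? st.1.length r = some k ∧ st.1[k]? = some false := by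
        simp only [PySem.List.pyGet?] at h
        cases hi : PySem.List.pyIdx? st.1.length r with
        | none => rw [hi] at h; simp at h
        | some k => exact ⟨k, rfl, by rw [hi] at h; simpa using h⟩
      have hklt : k < st.1.length := (List.getElem?_eq_some_iff.mp hkv).1
      have hset : PySem.List.pySetD st.1 r true = st.1.set k true := by
        simp [PySem.List.pySetD, PySem.List.pySet?, hk]
      rw [hset, List.count_set hklt]
      have hkf : st.1[k] = false := by
        have := (List.getElem?_eq_some_iff.mp hkv).2; simpa using this
      have hpos : 0 < st.1.count false := List.count_pos_iff.mpr (hkf ▸ List.getElem_mem hklt)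
      simp [hkf]
      exact List.count_pos_iff.mp hpos

theorem count_false_foldl_bfsStep (rooms : List (List Int)) :
    ∀ (queue : List Int) (v : List Bool) (t : List Int),
      (queue.foldl (bfsStep rooms) (v, t)).1.count false < v.count false ∨
        queue.foldl (bfsStep rooms) (v, t) = (v, t) := by
  intro queue
  induction queue with
  | nil => intro v t; right; rfl
  | cons r q ih =>
    intro v t
    simp only [List.foldl_cons]
    rcases count_false_bfsStep rooms (v, t) r with hlt | heq
    · left
      rcases ih (bfsStep rooms (v, t) r).1 (bfsStep rooms (v, t) r).2 with h2 | h2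
      · rw [Prod.mk.eta] at h2
        exact lt_trans h2 hlt
      · rw [Prod.mk.eta] at h2
        rw [h2]
        exact hlt
    · rw [heq]; exact ih v t

-- A's `while queue:` loop: fold the step over the whole frontier, then recurse on `temp`.
def bfsLoop (rooms : List (List Int)) (visited : List Bool) (queue : List Int) : List Bool :=
  if queue = [] then visited
  else
    bfsLoop rooms (queue.foldl (bfsStep rooms) (visited, [])).1
      (queue.foldl (bfsStep rooms) (visited, [])).2
termination_by 2 * visited.count false + (if queue = [] then 0 else 1)
decreasing_by
  all_goals rw [List.foldl_attach]
  all_goals rcases count_false_foldl_bfsStep rooms queue visited [] with h | h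
  · split <;> omega
  · rw [h]
    simp_all

def canVisitAllRoomsBFS (rooms : List (List Int)) : Bool :=
  let numRooms := rooms.length
  let visited := List.replicate numRooms false
  let visited := bfsLoop rooms visited [0]
  visited.all (fun b => b)

-- ===== PORT B =====
-- termination helper: marking an unvisited room decreases the number of `false` entries
theorem count_false_pySetD_lt (v : List Bool) (r : Int)
    (h : PySem.List.pyGet? v r = some false) :
    (PySem.List.pySetD v r true).count false < v.count false := by
  obtain ⟨k, hk, hkv⟩ : ∃ k, PySem.List.pyIdx? v.length r = some k ∧ v[k]? = some false := by
    simp only [PySem.List.pyGet?] at h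
    cases hi : PySem.List.pyIdx? v.length r with
    | none => rw [hi] at h; simp at h
    | some k => exact ⟨k, rfl, by rw [hi] at h; simpa using h⟩
  have hklt : k < v.length := (List.getElem?_eq_some_iff.mp hkv).1
  have hset : PySem.List.pySetD v r true = v.set k true := by
    simp [PySem.List.pySetD, PySem.List.pySet?, hk]
  have hkf : v[k] = false := by
    have := (List.getElem?_eq_some_iff.mp hkv).2; simpa using this
  have hpos : 0 < v.count false := List.count_pos_iff.mpr (hkf ▸ List.getElem_mem hklt)
  rw [hset, List.count_set hklt]
  simp [hkf]
  exact List.count_pos_iff.mp hpos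

-- B's `while stack:` loop: pop one room; if unvisited, mark it and push its keys.
def dfsLoop (rooms : List (List Int)) (visited : List Bool) (stack : List Int) : List Bool :=
  match hp : PySem.List.pop? stack with
  | none => visited
  | some (r, rest) =>
    match hg : PySem.List.pyGet? visited r with
    | none => visited
    | some true => dfsLoop rooms visited rest
    | some false =>
      dfsLoop rooms (PySem.List.pySetD visited r true)
        (rest ++ (PySem.List.pyGet? rooms r).getD [])
termination_by (visited.count false, stack.length)
decreasing_by
  · right
    have := PySem.List.length_of_pop?_eq_some stack hp
    simp at this ⊢; omega
  · left
    exact count_false_pySetD_lt visited r hg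

def canVisitAllRoomsBFS_alt (rooms : List (List Int)) : Bool :=
  let visited := List.replicate rooms.length false
  let visited := dfsLoop rooms visited [0]
  visited.all (fun b => b)

-- ===== PRECONDITION & SPEC =====
-- Definitions feeding Pre_ and its Decidable instance: the wrapped (Python negative-index)
-- room number a key denotes, the adjacency list of a room, and reachability from room 0
-- through in-range keys; reachB is a bounded fixpoint computation used ONLY to DECIDE
-- ReachIR (it is proved equivalent below), not by either port.
def wrapIdx (n : Nat) (i : Int) : Nat := if 0 ≤ i then i.toNat else n - (-i).toNat
def adjRaw (rooms : List (List Int)) (i : Nat) : List Int := (rooms[i]?).getD []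

inductive ReachIR (rooms : List (List Int)) : Nat → Prop
  | zero : ReachIR rooms 0
  | step {i : Nat} {k : Int} : ReachIR rooms i → k ∈ adjRaw rooms i →
      -(rooms.length : Int) ≤ k → k < (rooms.length : Int) → ReachIR rooms (wrapIdx rooms.length k)

theorem wrapIdx_lt (n : Nat) (k : Int) (h1 : -(n : Int) ≤ k) (h2 : k < (n : Int)) :
    wrapIdx n k < n := by
  unfold wrapIdx; split <;> omega

def reachB (rooms : List (List Int)) : Nat → Nat → Bool
  | 0, i => i == 0
  | (m+1), i => reachB rooms m i ||
      (List.range rooms.length).any (fun j => reachB rooms m j &&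
        (adjRaw rooms j).any (fun k =>
          decide (-(rooms.length : Int) ≤ k) && decide (k < (rooms.length : Int)) &&
          (wrapIdx rooms.length k == i)))

theorem reachB_succ_of (rooms : List (List Int)) (m : Nat) (i : Nat)
    (h : reachB rooms m i = true) : reachB rooms (m+1) i = true := by
  simp [reachB, h]

theorem reachB_mono (rooms : List (List Int)) {m m' : Nat} (h : m ≤ m') (i : Nat)
    (hr : reachB rooms m i = true) : reachB rooms m' i = true := by
  induction m', h using Nat.le_induction with
  | base => exact hr
  | succ m' _ ih => exact reachB_succ_of rooms m' i ih

theorem reachB_succ_iff (rooms : List (List Int)) (m : Nat) (i : Nat) :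
    reachB rooms (m+1) i = true ↔
      (reachB rooms m i = true ∨ ∃ j, j < rooms.length ∧ reachB rooms m j = true ∧
        ∃ k ∈ adjRaw rooms j, (-(rooms.length : Int) ≤ k ∧ k < (rooms.length : Int)) ∧
          wrapIdx rooms.length k = i) := by
  simp only [reachB, Bool.or_eq_true, List.any_eq_true, Bool.and_eq_true, beq_iff_eq,
    decide_eq_true_eq, List.mem_range]

theorem reachB_sound (rooms : List (List Int)) (m : Nat) (i : Nat)
    (h : reachB rooms m i = true) : ReachIR rooms i := by
  induction m generalizing i with
  | zero => simp [reachB] at h; exact h ▸ ReachIR.zero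
  | succ m ih =>
    simp only [reachB, Bool.or_eq_true, List.any_eq_true, Bool.and_eq_true, beq_iff_eq,
      decide_eq_true_eq, List.mem_range] at h
    rcases h with h | ⟨j, hj, hrj, k, hk, ⟨⟨hk1, hk2⟩, rfl⟩⟩
    · exact ih i h
    · exact ReachIR.step (ih j hrj) hk hk1 hk2

theorem reachIR_zero_or_lt (rooms : List (List Int)) (i : Nat) (h : ReachIR rooms i) :
    i = 0 ∨ i < rooms.length := by
  induction h with
  | zero => left; rfl
  | @step j k _ _ h1 h2 _ => right; exact wrapIdx_lt _ k h1 h2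

theorem reachB_lt (rooms : List (List Int)) (m : Nat) (i : Nat)
    (h : reachB rooms m i = true) : i < rooms.length + 1 := by
  rcases reachIR_zero_or_lt rooms i (reachB_sound rooms m i h) with rfl | h <;> omega

theorem reachB_succ_congr (rooms : List (List Int)) (m m' : Nat)
    (h : ∀ j, reachB rooms m j = reachB rooms m' j) (i : Nat) :
    reachB rooms (m+1) i = reachB rooms (m'+1) i := by
  simp only [reachB, h]

theorem reachB_stab (rooms : List (List Int)) (m : Nat)
    (h : ∀ i, reachB rooms (m+1) i = reachB rooms m i) :
    ∀ p i, reachB rooms (m+p) i = reachB rooms m i := by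
  intro p
  induction p with
  | zero => intro i; rfl
  | succ p ih =>
    intro i
    rw [show m + (p+1) = (m+p)+1 by omega, reachB_succ_congr rooms _ _ ih i, h i]

def reachS (rooms : List (List Int)) (m : Nat) : Finset Nat :=
  (Finset.range (rooms.length + 1)).filter (fun i => reachB rooms m i = true)

theorem reachS_grow (rooms : List (List Int)) (m : Nat)
    (h : ∃ i, reachB rooms (m+1) i ≠ reachB rooms m i) :
    (reachS rooms m).card < (reachS rooms (m+1)).card := by
  obtain ⟨i, hi⟩ := h
  have hnew : reachB rooms m i = false ∧ reachB rooms (m+1) i = true := by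
    cases hm : reachB rooms m i with
    | false =>
      cases hm1 : reachB rooms (m+1) i with
      | false => rw [hm, hm1] at hi; simp at hi
      | true => exact ⟨rfl, rfl⟩
    | true => exact absurd (by rw [reachB_succ_of rooms m i hm, hm]) hi
  apply Finset.card_lt_card
  constructor
  · intro x hx
    simp only [reachS, Finset.mem_filter, Finset.mem_range] at hx ⊢
    exact ⟨hx.1, reachB_succ_of rooms m x hx.2⟩
  · intro hsub
    have hin : i ∈ reachS rooms (m+1) := by
      simp only [reachS, Finset.mem_filter, Finset.mem_range]
      exact ⟨reachB_lt rooms (m+1) i hnew.2, hnew.2⟩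
    have := hsub hin
    simp only [reachS, Finset.mem_filter] at this
    rw [hnew.1] at this
    simp at this

theorem reachB_exists_stable (rooms : List (List Int)) :
    ∃ m, m ≤ rooms.length + 1 ∧ ∀ i, reachB rooms (m+1) i = reachB rooms m i := by
  by_contra hc
  have hc : ∀ m, m ≤ rooms.length + 1 → ∃ i, reachB rooms (m+1) i ≠ reachB rooms m i := by
    intro m hm
    by_contra h2
    exact hc ⟨m, hm, fun i => Decidable.of_not_not (fun h3 => h2 ⟨i, h3⟩)⟩
  have hgrow : ∀ m, m ≤ rooms.length + 2 → m + 1 ≤ (reachS rooms m).card := by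
    intro m
    induction m with
    | zero =>
      intro _
      have : 0 ∈ reachS rooms 0 := by
        simp [reachS, reachB]
      have := Finset.card_pos.mpr ⟨0, this⟩
      omega
    | succ m ih =>
      intro hm
      have h1 := ih (by omega)
      have h2 := reachS_grow rooms m (hc m (by omega))
      omega
  have h1 := hgrow (rooms.length + 2) (le_refl _)
  have h2 : (reachS rooms (rooms.length + 2)).card ≤ rooms.length + 1 := by
    calc (reachS rooms (rooms.length + 2)).card ≤ (Finset.range (rooms.length + 1)).card :=
          Finset.card_filter_le _ _
      _ = rooms.length + 1 := Finset.card_range _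
  omega

theorem reachB_complete (rooms : List (List Int)) (i : Nat) (h : ReachIR rooms i) :
    reachB rooms (rooms.length + 1) i = true := by
  obtain ⟨m0, hm0le, hm0⟩ := reachB_exists_stable rooms
  have hstab := reachB_stab rooms m0 hm0
  have key : ∀ m i, reachB rooms m i = true → reachB rooms (rooms.length + 1) i = true := by
    intro m i hm
    by_cases hle : m ≤ rooms.length + 1
    · exact reachB_mono rooms hle i hm
    · have : reachB rooms m i = reachB rooms m0 i := by
        have := hstab (m - m0) i
        rw [Nat.add_sub_cancel' (by omega)] at this
        exact this
      exact reachB_mono rooms (by omega) i (this ▸ hm)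
  induction h with
  | zero => exact key 0 0 (by simp [reachB])
  | @step j k hRj hk h1 h2 ih =>
    apply key (rooms.length + 2)
    rw [show rooms.length + 2 = (rooms.length + 1) + 1 by omega]
    have hjlt : j < rooms.length := by
      rcases reachIR_zero_or_lt rooms j hRj with rfl | h
      · rcases Nat.eq_zero_or_pos rooms.length with hz | hp
        · exfalso
          have : adjRaw rooms 0 = [] := by
            simp [adjRaw, List.getElem?_eq_none_iff.mpr (by omega)]
          rw [this] at hk; exact absurd hk (List.not_mem_nil)
        · exact hp
      · exact h
    exact (reachB_succ_iff rooms _ _).mpr (Or.inr ⟨j, hjlt, ih, k, hk, ⟨h1, h2⟩, rfl⟩)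

theorem reachIR_iff (rooms : List (List Int)) (i : Nat) :
    ReachIR rooms i ↔ reachB rooms (rooms.length + 1) i = true :=
  ⟨reachB_complete rooms i, reachB_sound rooms _ i⟩

theorem pre_iff (rooms : List (List Int)) :
    (rooms ≠ [] ∧ ∀ i ∈ List.range (rooms.length + 1), reachB rooms (rooms.length + 1) i = true →
        ∀ k ∈ adjRaw rooms i, -(rooms.length : Int) ≤ k ∧ k < (rooms.length : Int)) ↔
    (rooms ≠ [] ∧ ∀ i, ReachIR rooms i →
        ∀ k ∈ adjRaw rooms i, -(rooms.length : Int) ≤ k ∧ k < (rooms.length : Int)) := by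
  refine and_congr_right fun _ => ⟨fun h i hR => ?_, fun h i _ hB => h i ((reachIR_iff rooms i).mpr hB)⟩
  have hlt : i < rooms.length + 1 := by
    rcases reachIR_zero_or_lt rooms i hR with rfl | h' <;> omega
  exact h i (List.mem_range.mpr hlt) ((reachIR_iff rooms i).mp hR)

-- Pre_ excludes exactly the inputs on which A raises IndexError: rooms == [] (queue=[0]
-- immediately indexes an empty visited list), or some room reachable from room 0 holding a
-- key outside [-len(rooms), len(rooms)) (that key is reached and indexed).
def Pre_canVisitAllRoomsBFS (rooms : List (List Int)) : Prop :=
  rooms ≠ [] ∧ ∀ i, ReachIR rooms i →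
    ∀ k ∈ adjRaw rooms i, -(rooms.length : Int) ≤ k ∧ k < (rooms.length : Int)
instance (rooms : List (List Int)) : Decidable (Pre_canVisitAllRoomsBFS rooms) := by
  unfold Pre_canVisitAllRoomsBFS
  exact decidable_of_iff _ (pre_iff rooms)

def pvWitness_canVisitAllRoomsBFS : List (List Int) := [[1], [0, -2]]

def Spec_canVisitAllRoomsBFS (rooms : List (List Int)) (out : Bool) : Prop :=
  out = canVisitAllRoomsBFS_alt rooms
instance (rooms : List (List Int)) (out : Bool) : Decidable (Spec_canVisitAllRoomsBFS rooms out) := by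
  unfold Spec_canVisitAllRoomsBFS; infer_instance

-- ===== CLAIM (what is proved, stated in full; the proofs are below) =====
def Claim_equal_canVisitAllRoomsBFS : Prop :=
  ∀ (rooms : List (List Int)), Dom_canVisitAllRoomsBFS rooms →
    Pre_canVisitAllRoomsBFS rooms →
    Spec_canVisitAllRoomsBFS rooms (canVisitAllRoomsBFS rooms)

-- ===== LEMMAS AND PROOFS =====

def vAt (v : List Bool) (i : Nat) : Bool := v.getD i false

-- the worklist invariant shared by both loops; P is the pending list (any order)
def WInv (rooms : List (List Int)) (v : List Bool) (P : List Int) : Prop :=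
  v.length = rooms.length ∧
  (∀ r ∈ P, -(rooms.length : Int) ≤ r ∧ r < (rooms.length : Int)) ∧
  (∀ r ∈ P, ReachIR rooms (wrapIdx rooms.length r)) ∧
  (∀ i : Nat, vAt v i = true → ReachIR rooms i) ∧
  (∀ i : Nat, vAt v i = true → ∀ k ∈ adjRaw rooms i,
      vAt v (wrapIdx rooms.length k) = true ∨
        ∃ r ∈ P, wrapIdx rooms.length r = wrapIdx rooms.length k) ∧
  (vAt v 0 = true ∨ ∃ r ∈ P, wrapIdx rooms.length r = 0)

theorem pyIdx?_eq_wrap (n : Nat) (i : Int) (h1 : -(n : Int) ≤ i) (h2 : i < (n : Int)) :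
    PySem.List.pyIdx? n i = some (wrapIdx n i) ∧ wrapIdx n i < n := by
  simp only [PySem.List.pyIdx?, wrapIdx]
  split
  · simp_all
  · simp_all
    omega

theorem pyGet?_eq_wrap {α : Type} (xs : List α) (i : Int)
    (h1 : -(xs.length : Int) ≤ i) (h2 : i < (xs.length : Int)) :
    PySem.List.pyGet? xs i = xs[wrapIdx xs.length i]? := by
  simp [PySem.List.pyGet?, (pyIdx?_eq_wrap xs.length i h1 h2).1]

theorem pySetD_eq_wrap {α : Type} (xs : List α) (i : Int) (x : α)
    (h1 : -(xs.length : Int) ≤ i) (h2 : i < (xs.length : Int)) :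
    PySem.List.pySetD xs i x = xs.set (wrapIdx xs.length i) x := by
  simp [PySem.List.pySetD, PySem.List.pySet?, (pyIdx?_eq_wrap xs.length i h1 h2).1]

theorem vAt_eq_getElem (v : List Bool) (i : Nat) (h : i < v.length) : vAt v i = v[i] := by
  simp [vAt, List.getD_eq_getElem?_getD, List.getElem?_eq_getElem h]

theorem pyGet?_eq_some_vAt (v : List Bool) (i : Int)
    (h1 : -(v.length : Int) ≤ i) (h2 : i < (v.length : Int)) :
    PySem.List.pyGet? v i = some (vAt v (wrapIdx v.length i)) := by
  have hw := (pyIdx?_eq_wrap v.length i h1 h2).2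
  rw [pyGet?_eq_wrap v i h1 h2, List.getElem?_eq_getElem hw, vAt_eq_getElem v _ hw]

theorem vAt_set_self (v : List Bool) (i : Nat) (x : Bool) (h : i < v.length) :
    vAt (v.set i x) i = x := by
  rw [vAt_eq_getElem _ _ (by simpa using h)]; simp

theorem vAt_set_of_ne (v : List Bool) (i j : Nat) (x : Bool) (h : i ≠ j) :
    vAt (v.set i x) j = vAt v j := by
  simp [vAt, List.getD_eq_getElem?_getD, List.getElem?_set_ne h]

theorem vAt_set_of_true (v : List Bool) (i j : Nat) (h : vAt v j = true) :
    vAt (v.set i true) j = true := by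
  by_cases hij : i = j
  · subst hij
    by_cases hi : i < v.length
    · exact vAt_set_self v i true hi
    · rwa [List.set_eq_of_length_le (by omega)]
  · rwa [vAt_set_of_ne v i j true hij]

-- processing a pending key r that is already visited preserves the invariant
theorem inv_skip (rooms : List (List Int)) (v : List Bool) (P P' : List Int) (r : Int)
    (hI : WInv rooms v P) (hsub : P' ⊆ P) (hext : ∀ x ∈ P, x = r ∨ x ∈ P')
    (hvis : vAt v (wrapIdx rooms.length r) = true) : WInv rooms v P' := by
  obtain ⟨h1, h2, h3, h4, h5, h6⟩ := hI
  refine ⟨h1, fun x hx => h2 x (hsub hx), fun x hx => h3 x (hsub hx), h4, ?_, ?_⟩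
  · intro i hi k hk
    rcases h5 i hi k hk with hv | ⟨x, hx, hxw⟩
    · exact Or.inl hv
    · rcases hext x hx with rfl | hx'
      · exact Or.inl (hxw ▸ hvis)
      · exact Or.inr ⟨x, hx', hxw⟩
  · rcases h6 with hv | ⟨x, hx, hxw⟩
    · exact Or.inl hv
    · rcases hext x hx with rfl | hx'
      · exact Or.inl (hxw ▸ hvis)
      · exact Or.inr ⟨x, hx', hxw⟩

-- processing an unvisited pending key r (marking it, pushing its keys) preserves the invariant
theorem inv_mark (rooms : List (List Int)) (v : List Bool) (P P' : List Int) (r : Int)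
    (hIR : ∀ i, ReachIR rooms i →
      ∀ k ∈ adjRaw rooms i, -(rooms.length : Int) ≤ k ∧ k < (rooms.length : Int))
    (hI : WInv rooms v P) (hr : r ∈ P)
    (hsub : ∀ x ∈ P', x ∈ P ∨ x ∈ adjRaw rooms (wrapIdx rooms.length r))
    (hext : ∀ x ∈ P, x = r ∨ x ∈ P')
    (hadj : ∀ k ∈ adjRaw rooms (wrapIdx rooms.length r), k ∈ P') :
    WInv rooms (v.set (wrapIdx rooms.length r) true) P' := by
  obtain ⟨h1, h2, h3, h4, h5, h6⟩ := hI
  have hrw : wrapIdx rooms.length r < rooms.length :=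
    (pyIdx?_eq_wrap rooms.length r (h2 r hr).1 (h2 r hr).2).2
  have hRr : ReachIR rooms (wrapIdx rooms.length r) := h3 r hr
  have hadjmem : ∀ k ∈ adjRaw rooms (wrapIdx rooms.length r),
      -(rooms.length : Int) ≤ k ∧ k < (rooms.length : Int) := hIR _ hRr
  have hvset : vAt (v.set (wrapIdx rooms.length r) true) (wrapIdx rooms.length r) = true :=
    vAt_set_self v _ true (h1 ▸ hrw)
  refine ⟨by simpa using h1, ?_, ?_, ?_, ?_, ?_⟩
  · intro x hx
    rcases hsub x hx with hxP | hxA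
    · exact h2 x hxP
    · exact hadjmem x hxA
  · intro x hx
    rcases hsub x hx with hxP | hxA
    · exact h3 x hxP
    · exact ReachIR.step hRr hxA (hadjmem x hxA).1 (hadjmem x hxA).2
  · intro i hi
    by_cases hir : i = wrapIdx rooms.length r
    · exact hir ▸ hRr
    · exact h4 i (by rwa [vAt_set_of_ne v _ i true (fun h => hir h.symm)] at hi)
  · intro i hi k hk
    by_cases hir : i = wrapIdx rooms.length r
    · subst hir
      exact Or.inr ⟨k, hadj k hk, rfl⟩
    · have hi' : vAt v i = true := by
        rwa [vAt_set_of_ne v _ i true (fun h => hir h.symm)] at hi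
      rcases h5 i hi' k hk with hv | ⟨x, hx, hxw⟩
      · exact Or.inl (vAt_set_of_true v _ _ hv)
      · rcases hext x hx with rfl | hx'
        · exact Or.inl (hxw ▸ hvset)
        · exact Or.inr ⟨x, hx', hxw⟩
  · rcases h6 with hv | ⟨x, hx, hxw⟩
    · exact Or.inl (vAt_set_of_true v _ _ hv)
    · rcases hext x hx with rfl | hx'
      · by_cases h0 : wrapIdx rooms.length x = 0
        · exact Or.inl (h0 ▸ hvset)
        · exact absurd hxw h0
      · exact Or.inr ⟨x, hx', hxw⟩

-- an exhausted worklist characterises the visited list as exactly the reachable set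
theorem inv_final (rooms : List (List Int)) (v : List Bool) (hI : WInv rooms v []) :
    ∀ i : Nat, vAt v i = true ↔ ReachIR rooms i := by
  obtain ⟨h1, _, _, h4, h5, h6⟩ := hI
  intro i
  constructor
  · exact h4 i
  · intro hR
    induction hR with
    | zero => rcases h6 with hv | ⟨x, hx, _⟩; exact hv; exact absurd hx (List.not_mem_nil)
    | @step i k hRi hk _ _ ih =>
      rcases h5 _ ih _ hk with hv | ⟨x, hx, _⟩
      · exact hv
      · exact absurd hx (List.not_mem_nil)

theorem inv_init (rooms : List (List Int)) (hne : rooms ≠ []) :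
    WInv rooms (List.replicate rooms.length false) [0] := by
  have hn : 0 < rooms.length := List.length_pos_iff.mpr hne
  have hfalse : ∀ i : Nat, vAt (List.replicate rooms.length false) i = false := by
    intro i; simp [vAt, List.getD_eq_getElem?_getD, List.getElem?_replicate]; split <;> rfl
  refine ⟨by simp, ?_, ?_, ?_, ?_, ?_⟩
  · intro r hr; simp at hr; subst hr; constructor <;> omega
  · intro r hr; simp at hr; subst hr
    have : wrapIdx rooms.length 0 = 0 := by simp [wrapIdx]
    exact this ▸ ReachIR.zero
  · intro i hi; rw [hfalse i] at hi; exact absurd hi (by simp)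
  · intro i hi; rw [hfalse i] at hi; exact absurd hi (by simp)
  · right; exact ⟨0, by simp, by simp [wrapIdx]⟩

-- invariant preservation through A's inner fold over one frontier
theorem bfs_fold_inv (rooms : List (List Int))
    (hIR : ∀ i, ReachIR rooms i →
      ∀ k ∈ adjRaw rooms i, -(rooms.length : Int) ≤ k ∧ k < (rooms.length : Int)) :
    ∀ (queue : List Int) (v : List Bool) (t : List Int), WInv rooms v (queue ++ t) →
      WInv rooms (queue.foldl (bfsStep rooms) (v, t)).1 (queue.foldl (bfsStep rooms) (v, t)).2 := by
  intro queue
  induction queue with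
  | nil => intro v t hI; simpa using hI
  | cons r q ih =>
    intro v t hI
    have hlen : v.length = rooms.length := hI.1
    have hrng := hI.2.1 r (by simp)
    have hget : PySem.List.pyGet? v r = some (vAt v (wrapIdx v.length r)) :=
      pyGet?_eq_some_vAt v r (by omega) (by omega)
    have hwr : wrapIdx v.length r = wrapIdx rooms.length r := by rw [hlen]
    simp only [List.foldl_cons]
    have hstep : bfsStep rooms (v, t) r =
        if vAt v (wrapIdx rooms.length r) then (v, t)
        else (PySem.List.pySetD v r true, t ++ (PySem.List.pyGet? rooms r).getD []) := by
      simp [bfsStep, hget, hwr]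
    by_cases hvis : vAt v (wrapIdx rooms.length r) = true
    · rw [hstep, if_pos hvis]
      exact ih v t (inv_skip rooms v (r :: q ++ t) (q ++ t) r hI
        (by intro x hx; simp at hx ⊢; tauto)
        (by intro x hx; simp at hx ⊢; tauto) hvis)
    · rw [hstep, if_neg (by simpa using hvis)]
      have hset : PySem.List.pySetD v r true = v.set (wrapIdx rooms.length r) true := by
        rw [pySetD_eq_wrap v r true (by omega) (by omega), hwr]
      have hadjget : (PySem.List.pyGet? rooms r).getD [] = adjRaw rooms (wrapIdx rooms.length r) := by
        rw [pyGet?_eq_wrap rooms r hrng.1 hrng.2]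
        simp [adjRaw]
      rw [hset, hadjget]
      apply ih
      exact inv_mark rooms v (r :: q ++ t) (q ++ (t ++ adjRaw rooms (wrapIdx rooms.length r))) r hIR hI
        (by simp)
        (by intro x hx; simp at hx ⊢; tauto)
        (by intro x hx; simp at hx ⊢; tauto)
        (by intro k hk; simp [hk])

-- invariant preservation through A's outer while-loop
theorem bfs_inv (rooms : List (List Int))
    (hIR : ∀ i, ReachIR rooms i →
      ∀ k ∈ adjRaw rooms i, -(rooms.length : Int) ≤ k ∧ k < (rooms.length : Int)) :
    ∀ (v : List Bool) (queue : List Int), WInv rooms v queue →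
      WInv rooms (bfsLoop rooms v queue) [] := by
  intro v queue
  induction v, queue using bfsLoop.induct rooms with
  | case1 v => intro hI; rw [bfsLoop]; simpa using hI
  | case2 v queue hq ih =>
    intro hI
    rw [bfsLoop, if_neg hq]
    rw [List.foldl_attach] at ih
    exact ih (bfs_fold_inv rooms hIR queue v [] (by simpa using hI))

-- branch equations of dfsLoop (the match carries its equation, so we name each branch)
theorem dfsLoop_eq_nil (rooms : List (List Int)) (v : List Bool) (stack : List Int)
    (hp : PySem.List.pop? stack = none) : dfsLoop rooms v stack = v := by
  rw [dfsLoop]; split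
  · rfl
  · simp_all

theorem dfsLoop_eq_skip (rooms : List (List Int)) (v : List Bool) (stack : List Int)
    (r : Int) (rest : List Int) (hp : PySem.List.pop? stack = some (r, rest))
    (hg : PySem.List.pyGet? v r = some true) :
    dfsLoop rooms v stack = dfsLoop rooms v rest := by
  rw [dfsLoop]; split
  · simp_all
  · rename_i r' rest' hp'
    rw [hp] at hp'
    injection hp' with h
    injection h with h1 h2
    subst h1; subst h2
    split <;> simp_all

theorem dfsLoop_eq_mark (rooms : List (List Int)) (v : List Bool) (stack : List Int)
    (r : Int) (rest : List Int) (hp : PySem.List.pop? stack = some (r, rest))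
    (hg : PySem.List.pyGet? v r = some false) :
    dfsLoop rooms v stack =
      dfsLoop rooms (PySem.List.pySetD v r true)
        (rest ++ (PySem.List.pyGet? rooms r).getD []) := by
  rw [dfsLoop]; split
  · simp_all
  · rename_i r' rest' hp'
    rw [hp] at hp'
    injection hp' with h
    injection h with h1 h2
    subst h1; subst h2
    split <;> simp_all

-- a successful pop? (default -1) splits the stack as rest ++ [r]
theorem pop?_last_eq (stack : List Int) (r : Int) (rest : List Int)
    (hp : PySem.List.pop? stack = some (r, rest)) : stack = rest ++ [r] := by
  rcases List.eq_nil_or_concat' stack with rfl | ⟨ys, y, rfl⟩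
  · simp [PySem.List.pop?, PySem.List.pyIdx?] at hp
  · rw [PySem.List.pop?_last] at hp
    obtain ⟨rfl, rfl⟩ : y = r ∧ ys = rest := by simpa using hp
    rfl

-- invariant preservation through B's DFS loop
theorem dfs_inv (rooms : List (List Int))
    (hIR : ∀ i, ReachIR rooms i →
      ∀ k ∈ adjRaw rooms i, -(rooms.length : Int) ≤ k ∧ k < (rooms.length : Int)) :
    ∀ (v : List Bool) (stack : List Int), WInv rooms v stack →
      WInv rooms (dfsLoop rooms v stack) [] := by
  intro v stack
  induction v, stack using dfsLoop.induct rooms with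
  | case1 v stack hp =>
    intro hI
    rw [dfsLoop_eq_nil rooms v stack hp]
    have : stack = [] := by
      by_contra hne
      obtain ⟨ys, y, rfl⟩ := List.eq_nil_or_concat' stack |>.resolve_left hne
      rw [PySem.List.pop?_last] at hp; exact absurd hp (by simp)
    exact this ▸ hI
  | case2 v stack r rest hp hget =>
    -- pyGet? visited r = none is impossible under the invariant
    intro hI
    exfalso
    have hlen : v.length = rooms.length := hI.1
    have hrmem : r ∈ stack := by rw [pop?_last_eq stack r rest hp]; simp
    have hrng := hI.2.1 r hrmem
    rw [pyGet?_eq_some_vAt v r (by omega) (by omega)] at hget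
    exact absurd hget (by simp)
  | case3 v stack r rest hp hget ih =>
    intro hI
    rw [dfsLoop_eq_skip rooms v stack r rest hp hget]
    obtain rfl : stack = rest ++ [r] := pop?_last_eq stack r rest hp
    have hlen : v.length = rooms.length := hI.1
    have hrng := hI.2.1 r (by simp)
    have hget' : PySem.List.pyGet? v r = some (vAt v (wrapIdx v.length r)) :=
      pyGet?_eq_some_vAt v r (by omega) (by omega)
    have hv : vAt v (wrapIdx rooms.length r) = true := by
      rw [hget', hlen] at hget
      exact ((Option.some.injEq _ _).mp hget).symm ▸ rfl
    exact ih (inv_skip rooms v (rest ++ [r]) rest r hI (by simp)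
      (by intro x hx; simp at hx ⊢; tauto) hv)
  | case4 v stack r rest hp hget ih =>
    intro hI
    rw [dfsLoop_eq_mark rooms v stack r rest hp hget]
    obtain rfl : stack = rest ++ [r] := pop?_last_eq stack r rest hp
    have hlen : v.length = rooms.length := hI.1
    have hrng := hI.2.1 r (by simp)
    have hset : PySem.List.pySetD v r true = v.set (wrapIdx rooms.length r) true := by
      rw [pySetD_eq_wrap v r true (by omega) (by omega), hlen]
    have hadjget : (PySem.List.pyGet? rooms r).getD [] = adjRaw rooms (wrapIdx rooms.length r) := by
      rw [pyGet?_eq_wrap rooms r hrng.1 hrng.2]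
      simp [adjRaw]
    rw [hset, hadjget] at ih ⊢
    apply ih
    exact inv_mark rooms v (rest ++ [r]) (rest ++ adjRaw rooms (wrapIdx rooms.length r)) r hIR hI
      (by simp)
      (by intro x hx; simp at hx ⊢; tauto)
      (by intro x hx; simp at hx ⊢; tauto)
      (by intro k hk; simp [hk])

-- ===== VERDICT (by name: the statement is the Claim_ definition above) =====
theorem canVisitAllRoomsBFS_spec : Claim_equal_canVisitAllRoomsBFS := by
  unfold Claim_equal_canVisitAllRoomsBFS
  intro rooms _ hpre
  obtain ⟨hne, hIR⟩ := hpre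
  unfold Spec_canVisitAllRoomsBFS canVisitAllRoomsBFS canVisitAllRoomsBFS_alt
  have hI0 := inv_init rooms hne
  have hA := bfs_inv rooms hIR _ _ hI0
  have hB := dfs_inv rooms hIR _ _ hI0
  have hAc := inv_final rooms _ hA
  have hBc := inv_final rooms _ hB
  have hlenA : (bfsLoop rooms (List.replicate rooms.length false) [0]).length = rooms.length := hA.1
  have hlenB : (dfsLoop rooms (List.replicate rooms.length false) [0]).length = rooms.length := hB.1
  have heq : bfsLoop rooms (List.replicate rooms.length false) [0] =
      dfsLoop rooms (List.replicate rooms.length false) [0] := by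
    apply List.ext_getElem (by rw [hlenA, hlenB])
    intro i h1 h2
    rw [← vAt_eq_getElem _ _ h1, ← vAt_eq_getElem _ _ h2]
    by_cases hR : ReachIR rooms i
    · rw [(hAc i).mpr hR, (hBc i).mpr hR]
    · have := (hAc i); have := (hBc i)
      rcases Bool.eq_false_or_eq_true (vAt (bfsLoop rooms (List.replicate rooms.length false) [0]) i) with h | h <;>
      rcases Bool.eq_false_or_eq_true (vAt (dfsLoop rooms (List.replicate rooms.length false) [0]) i) with h' | h' <;>
        simp_all
  simp only [heq]
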